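-- pv_equiv track=rewrite | github.com/JHNUL/ohjelmistotuotanto2022 | viikko5/int-joukko/src/komennot.py | suorita
-- ===== SOURCE A (Python) =====
-- def suorita(luku, lukujono):
--     siirra = False
--     for (i, alkio) in enumerate(lukujono):
--         if siirra:
--             lukujono[i-1] = lukujono[i]
--             lukujono[i] = 0
--         if alkio == luku:
--             lukujono[i] = 0
--             siirra = True
--     return siirra
-- ===== SOURCE B (Python) =====
-- def suorita(luku, lukujono):
--     try:
--         idx = lukujono.index(luku)
--     except ValueError:
--         return False
--     del lukujono[idx]
--     lukujono.append(0)
--     return True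
-- ===== Notes on version B (the rewrite author's own statement) =====
-- stated objective: idiomatic
-- what changed: Replaces A's element-wise boolean-flag shifting pass with a locate-then-transform decomposition: a guarded lukujono.index lookup, then del at that index plus append(0), performing the same in-place mutation.
import Mathlib
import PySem

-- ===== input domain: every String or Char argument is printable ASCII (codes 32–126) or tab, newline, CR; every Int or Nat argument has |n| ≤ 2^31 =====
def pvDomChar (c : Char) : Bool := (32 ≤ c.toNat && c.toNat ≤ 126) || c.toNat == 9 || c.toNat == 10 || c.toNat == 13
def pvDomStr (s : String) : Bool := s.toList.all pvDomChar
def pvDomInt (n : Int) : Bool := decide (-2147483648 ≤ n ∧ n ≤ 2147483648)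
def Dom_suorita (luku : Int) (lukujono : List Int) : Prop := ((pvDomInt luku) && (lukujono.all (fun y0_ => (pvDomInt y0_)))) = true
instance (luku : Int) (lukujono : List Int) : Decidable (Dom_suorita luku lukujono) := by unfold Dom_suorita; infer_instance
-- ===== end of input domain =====

-- B replaces A's flag-driven shifting pass with an idiomatic index/del/append decomposition;
-- both mutate the Python list identically, and the equivalence proved here is about the RETURN value.

-- ===== PORT A =====
-- the for-loop over enumerate(lukujono), carrying the mutated list and the siirra flag;
-- fuel = the original length (enumerate visits exactly that many indices)
def suoritaLoop (luku : Int) : Nat → Nat → List Int → Bool → Bool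
  | 0, _, _, siirra => siirra
  | fuel + 1, i, xs, siirra =>
      if _h : i < xs.length then
        let alkio := xs.getD i 0
        let xs1 := if siirra then (xs.set (i - 1) (xs.getD i 0)).set i 0 else xs
        let st2 := if alkio == luku then (xs1.set i 0, true) else (xs1, siirra)
        suoritaLoop luku fuel (i + 1) st2.1 st2.2
      else siirra

def suorita (luku : Int) (lukujono : List Int) : Bool :=
  suoritaLoop luku lukujono.length 0 lukujono false

-- ===== PORT B =====
-- try: idx = lukujono.index(luku)  except ValueError: return False; then del/append (pure
-- list restructuring, not part of the returned value) and return True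
def suorita_alt (luku : Int) (lukujono : List Int) : Bool :=
  match PySem.List.index? lukujono luku with
  | none => false
  | some _ => true

-- ===== PRECONDITION & SPEC =====
def Spec_suorita (luku : Int) (lukujono : List Int) (out : Bool) : Prop := out = suorita_alt luku lukujono
instance (luku : Int) (lukujono : List Int) (out : Bool) : Decidable (Spec_suorita luku lukujono out) := by unfold Spec_suorita; infer_instance

-- ===== CLAIM (what is proved, stated in full; the proofs are below) =====
def Claim_equal_suorita : Prop := ∀ (luku : Int) (lukujono : List Int), Dom_suorita luku lukujono → Spec_suorita luku lukujono (suorita luku lukujono)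

-- ===== LEMMAS AND PROOFS =====

-- the loop's writes touch only indices ≤ i, so the tail beyond i is the original tail;
-- the result is "flag already set, or luku occurs among the next `fuel` elements"
theorem suoritaLoop_eq_contains (luku : Int) :
    ∀ (fuel i : Nat) (xs : List Int) (s : Bool),
      suoritaLoop luku fuel i xs s = (s || (((xs.drop i).take fuel).contains luku)) := by
  intro fuel
  induction fuel with
  | zero => intro i xs s; simp [suoritaLoop]
  | succ k ih =>
    intro i xs s
    by_cases h : i < xs.length
    · rw [suoritaLoop]
      simp only [h, dif_pos]
      rw [ih]
      have hdrop : xs.drop i = xs[i] :: xs.drop (i + 1) := List.drop_eq_getElem_cons h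
      -- the tail beyond index i is untouched by the sets at indices ≤ i
      have htail : ∀ (ys : List Int) (j : Nat), j ≤ i → (ys.set j 0).drop (i+1) = ys.drop (i+1) := by
        intro ys j hj
        apply List.ext_getElem
        · simp [List.length_set]
        · intro n h1 h2
          simp only [List.getElem_drop, List.getElem_set]
          rw [if_neg]; omega
      have hset1 : ∀ (ys : List Int) (v : Int), (ys.set (i-1) v).drop (i+1) = ys.drop (i+1) := by
        intro ys v
        apply List.ext_getElem
        · simp [List.length_set]
        · intro n h1 h2
          simp only [List.getElem_drop, List.getElem_set]
          rw [if_neg]; omega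
      have hxs1 : (if s then (xs.set (i - 1) (xs.getD i 0)).set i 0 else xs).drop (i+1) = xs.drop (i+1) := by
        by_cases hs : s
        · simp only [hs, if_pos]; rw [htail _ i le_rfl, hset1]
        · simp [hs]
      by_cases hm : xs.getD i 0 == luku
      · simp only [hm, if_pos]
        rw [htail _ i le_rfl, hxs1, hdrop]
        have : xs.getD i 0 = xs[i] := List.getD_eq_getElem xs 0 h
        simp only [List.take_succ_cons, List.contains_cons]
        rw [this] at hm
        have hm' : (luku == xs[i]) = true := beq_iff_eq.mpr (eq_of_beq hm).symm
        simp [hm']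
      · simp only [hm, if_neg, Bool.false_eq_true, not_false_iff]
        rw [hxs1, hdrop]
        have : xs.getD i 0 = xs[i] := List.getD_eq_getElem xs 0 h
        rw [this] at hm
        have hne : (luku == xs[i]) = false :=
          beq_eq_false_iff_ne.mpr (fun he => hm (beq_iff_eq.mpr he.symm))
        simp only [List.take_succ_cons, List.contains_cons, hne, Bool.false_or]
    · rw [suoritaLoop]
      simp only [h, dif_neg, not_false_iff]
      rw [List.drop_eq_nil_of_le (by omega)]
      simp

theorem suorita_alt_eq_contains (luku : Int) (xs : List Int) :
    suorita_alt luku xs = xs.contains luku := by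
  unfold suorita_alt
  rcases hx : PySem.List.index? xs luku with _ | k
  · have := (PySem.List.index?_eq_none_iff (xs := xs) (v := luku)).mp hx
    simp [this]
  · have : luku ∈ xs := by
      rw [← PySem.List.index?_isSome_iff (xs := xs) (v := luku), hx]; rfl
    simp [this]

-- ===== VERDICT (by name: the statement is the Claim_ definition above) =====
theorem suorita_spec : Claim_equal_suorita := by
  intro luku xs _
  unfold Spec_suorita suorita
  rw [suoritaLoop_eq_contains, suorita_alt_eq_contains]
  simp
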